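/- GENERATED by farm/mkstatement.py from design/units.tsv (unit `vorbis_decode_initial.5`) and the assertions of Vorbis/Spec/DecodeInitial.lean — do not edit.
   THE STATEMENT of the proof unit `vorbis_decode_initial.5`: segment 5 of `vorbis_decode_initial` (19 instructions; entries 0x11321e;
   exits 0x1133c3,0x113265; ranges 0x11321e-0x113260 + 0x1133d2-0x1133d8)
   takes each of its entry assertions to one of its exit assertions (`Vorbis.Spec.vorbis_decode_initial.Seg5`), given the contracts of its callees.
   What the names mean: Vorbis/Spec/Basic.lean (the shared hypotheses), Vorbis/Spec/DecodeInitial.lean (the assertions). The theorem to prove: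
   `theorem vorbis_decode_initial_5_ok : Vorbis.Spec.vorbis_decode_initial_5.Statement`. -/
import Vorbis.Spec.DecodeInitial
namespace Vorbis.Spec.vorbis_decode_initial_5
open X86 X86.User Asan

/-- The statement of unit `vorbis_decode_initial.5`. -/
def Statement : Prop :=
  ∀ (Lay : Layout) (_hLay : Lay.hi = 0x1000000) (μ : Microarch) (_hμ : UserX.MicroOK μ) (u₀ : State)
    (_hcode : HasCodeNat Lay u₀ Vorbis.L.vorbis_decode_initial.entry Vorbis.Code.code_vorbis_decode_initial.nat Vorbis.L.vorbis_decode_initial.size)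
    (_h_asan_store4_noabort : Asan.SmallCheck Lay μ Vorbis.WayInv (Vorbis.CodeOK u₀) [.rax, .rcx, .rdx] 4 Vorbis.L.__asan_store4_noabort.entry)
    (_h_asan_load4_noabort : Asan.SmallCheck Lay μ Vorbis.WayInv (Vorbis.CodeOK u₀) [.rax, .rcx, .rdx] 4 Vorbis.L.__asan_load4_noabort.entry)
    (_h_asan_load1_noabort : Asan.SmallCheck Lay μ Vorbis.WayInv (Vorbis.CodeOK u₀) [.rax, .rdx] 1 Vorbis.L.__asan_load1_noabort.entry),
    Vorbis.Spec.vorbis_decode_initial.Seg5 Lay μ u₀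

end Vorbis.Spec.vorbis_decode_initial_5
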